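-- pv_equiv track=rewrite | github.com/Dnlbb/algorithms-Yandex | Fish Seller.py | search12
-- ===== SOURCE A (Python) =====
-- def search12(xs,K):
--   max = 0
--   for i in range(len(xs)):
--     if i - K >= 0:
--       p = i - K
--     elif i- K <0:
--       p = 0
--     for j in range(p, i):
--       if xs[i] - xs[j] > max:
--         max = xs[i] - xs[j]
--   return max
-- ===== SOURCE B (Python) =====
-- def search12(xs, K):
--     # Sliding-window minimum via a monotonic queue: for each i the best trade
--     # ending at i is xs[i] minus the minimum of the previous K elements.
--     if K <= 0:
--         return 0
--     best = 0
--     dq = []    # indices whose values are strictly increasing; dq[head:] is the live queue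
--     head = 0   # front pointer (popped-front entries stay in the list, O(1) popleft)
--     for i in range(len(xs)):
--         while head < len(dq) and dq[head] < i - K:
--             head += 1
--         if head < len(dq):
--             d = xs[i] - xs[dq[head]]
--             if d > best:
--                 best = d
--         while len(dq) > head and xs[dq[-1]] >= xs[i]:
--             dq.pop()
--         dq.append(i)
--     return best
-- ===== Notes on version B (the rewrite author's own statement) =====
-- stated objective: faster
-- what changed: Replaces A's rescan of the whole previous-K window at every position by a monotonic queue that maintains the sliding-window minimum, so each index is pushed and popped at most once.
import Mathlib
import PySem

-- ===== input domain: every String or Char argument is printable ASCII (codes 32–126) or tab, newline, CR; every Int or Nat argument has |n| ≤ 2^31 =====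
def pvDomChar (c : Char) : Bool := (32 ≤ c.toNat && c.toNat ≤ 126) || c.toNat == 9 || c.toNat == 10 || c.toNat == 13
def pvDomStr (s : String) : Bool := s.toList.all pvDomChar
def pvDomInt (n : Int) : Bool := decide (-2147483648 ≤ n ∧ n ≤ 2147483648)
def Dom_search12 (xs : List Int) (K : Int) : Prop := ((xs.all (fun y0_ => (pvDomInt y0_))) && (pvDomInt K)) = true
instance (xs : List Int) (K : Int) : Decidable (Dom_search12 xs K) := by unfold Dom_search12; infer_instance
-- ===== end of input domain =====

-- B replaces A's rescan of the whole previous-K window by a monotonic queue (sliding-window minimum); same return value everywhere.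

-- ===== PORT A =====
-- literal port of A: for each i, scan the whole window range(p, i) (p = max(0, i-K)) for the best difference.
-- indices produced by range are provably in bounds, so pyGetD is exact for xs[i], xs[j].
def search12 (xs : List Int) (K : Int) : Int :=
  (PySem.List.pyRange 0 (PySem.List.len xs) 1).foldl (fun m i =>
    -- 'if i-K >= 0: p = i-K elif i-K < 0: p = 0' — the elif test is the exact complement of the if test
    let p : Int := if i - K ≥ 0 then i - K else 0
    (PySem.List.pyRange p i 1).foldl (fun m j =>
      if PySem.List.pyGetD xs i 0 - PySem.List.pyGetD xs j 0 > m
      then PySem.List.pyGetD xs i 0 - PySem.List.pyGetD xs j 0 else m) m) 0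

-- ===== PORT B =====
-- B keeps the deque as a list plus a front pointer `head` (popped-front entries stay in the list), exactly as Source B does.
-- 'while head < len(dq) and dq[head] < i - K: head += 1'
def advanceHead (dq : List Nat) (bound : Int) (head : Nat) : Nat :=
  if h : head < dq.length ∧ ((dq.getD head 0 : Nat) : Int) < bound then
    advanceHead dq bound (head + 1)
  else head
termination_by dq.length - head
decreasing_by omega

-- 'while len(dq) > head and xs[dq[-1]] >= xs[i]: dq.pop()'   (v = xs[i]; dq[-1] = dq[len(dq)-1])
def popBack (xs : List Int) (v : Int) (head : Nat) (dq : List Nat) : List Nat :=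
  if h : head < dq.length ∧ v ≤ xs.getD (dq.getD (dq.length - 1) 0) 0 then
    popBack xs v head dq.dropLast
  else dq
termination_by dq.length
decreasing_by
  have h2 : dq.dropLast.length = dq.length - 1 := List.length_dropLast
  omega

-- one iteration of Source B's main loop; state = (best, dq, head); deque entries index xs, getD is exact for xs[·]
def altStep (xs : List Int) (K : Int) (st : Int × List Nat × Nat) (i : Nat) : Int × List Nat × Nat :=
  let head := advanceHead st.2.1 ((i : Int) - K) st.2.2
  let best :=
    if head < st.2.1.length then
      let d := xs.getD i 0 - xs.getD (st.2.1.getD head 0) 0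
      if d > st.1 then d else st.1
    else st.1
  (best, popBack xs (xs.getD i 0) head st.2.1 ++ [i], head)

def search12_alt (xs : List Int) (K : Int) : Int :=
  if K ≤ 0 then 0
  else ((List.range xs.length).foldl (altStep xs K) (0, ([], 0))).1

-- ===== PRECONDITION & SPEC =====
def Spec_search12 (xs : List Int) (K : Int) (out : Int) : Prop := out = search12_alt xs K
instance (xs : List Int) (K : Int) (out : Int) : Decidable (Spec_search12 xs K out) := by unfold Spec_search12; infer_instance

-- ===== CLAIM (what is proved, stated in full; the proofs are below) =====
def Claim_equal_search12 : Prop := ∀ (xs : List Int) (K : Int), Dom_search12 xs K → Spec_search12 xs K (search12 xs K)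

-- ===== LEMMAS AND PROOFS =====

-- common reference value: for each i, fold of max over the window [max(0,i-K), i) of xs[i]-xs[j]
def loN (K : Int) (i : Nat) : Nat := ((i : Int) - K).toNat

def win (K : Int) (i : Nat) : List Nat := List.range' (loN K i) (i - loN K i)

def winStep (xs : List Int) (i : Nat) : Int → Nat → Int :=
  fun m j => max m (xs.getD i 0 - xs.getD j 0)

def spec (xs : List Int) (K : Int) : Int :=
  (List.range xs.length).foldl (fun m i => (win K i).foldl (winStep xs i) m) 0

theorem ite_gt_max (m d : Int) : (if d > m then d else m) = max m d := by
  rcases le_total m d with h | h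
  · rw [max_eq_right h]; split <;> omega
  · rw [max_eq_left h]; split <;> omega

-- ---------- A = spec ----------
theorem A_eq_spec (xs : List Int) (K : Int) : search12 xs K = spec xs K := by
  unfold search12 spec
  rw [show PySem.List.len xs = ((xs.length : Nat) : Int) from by simp [PySem.List.len_eq],
      PySem.List.pyRange_zero_nat, List.foldl_map]
  apply PySem.List.foldl_congr_mem
  intro m i hi
  show (PySem.List.pyRange (if ((i : Nat) : Int) - K ≥ 0 then ((i : Nat) : Int) - K else 0) ((i : Nat) : Int) 1).foldl
      (fun m j =>
        if PySem.List.pyGetD xs ((i : Nat) : Int) 0 - PySem.List.pyGetD xs j 0 > m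
        then PySem.List.pyGetD xs ((i : Nat) : Int) 0 - PySem.List.pyGetD xs j 0 else m) m
    = (win K i).foldl (winStep xs i) m
  have hp : (if ((i : Nat) : Int) - K ≥ 0 then ((i : Nat) : Int) - K else 0) = ((loN K i : Nat) : Int) := by
    unfold loN; split <;> omega
  have hcnt : (((i : Nat) : Int) - ((loN K i : Nat) : Int)).toNat = i - loN K i := by omega
  rw [hp, PySem.List.pyRange_one, hcnt]
  unfold win
  rw [List.range'_eq_map_range, List.foldl_map, List.foldl_map]
  apply PySem.List.foldl_congr_mem
  intro acc k hk
  have hgi : PySem.List.pyGetD xs ((i : Nat) : Int) 0 = xs.getD i 0 := PySem.List.pyGetD_natCast xs i 0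
  have hgj : PySem.List.pyGetD xs (((loN K i : Nat) : Int) + ((k : Nat) : Int)) 0 = xs.getD (loN K i + k) 0 := by
    rw [show ((loN K i : Nat) : Int) + ((k : Nat) : Int) = ((loN K i + k : Nat) : Int) from by push_cast; ring]
    exact PySem.List.pyGetD_natCast xs (loN K i + k) 0
  rw [hgi, hgj, ite_gt_max]
  rfl

-- ---------- spec for K ≤ 0 (every window is empty) ----------
theorem spec_of_nonpos (xs : List Int) (K : Int) (hK : K ≤ 0) : spec xs K = 0 := by
  unfold spec
  have hcg : ∀ (m : Int), ∀ i ∈ List.range xs.length, (win K i).foldl (winStep xs i) m = m := by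
    intro m i _
    have hw : win K i = [] := by
      unfold win loN
      have h0 : i - ((i : Int) - K).toNat = 0 := by omega
      rw [h0]
      rfl
    rw [hw]
    rfl
  rw [PySem.List.foldl_congr_mem _ _ (fun m _ => m) _ hcg, PySem.List.foldl_ignore]

-- ---------- the deque invariant ----------
def dRel (xs : List Int) : Nat → Nat → Prop :=
  fun a b => a < b ∧ xs.getD a 0 < xs.getD b 0

def DqInv (xs : List Int) (K : Int) (i : Nat) (live : List Nat) : Prop :=
  (∀ d ∈ live, d < i) ∧ live.Pairwise (dRel xs) ∧
  (∀ j : Nat, (i : Int) - K ≤ (j : Int) → j < i →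
    ∃ d ∈ live, j ≤ d ∧ xs.getD d 0 ≤ xs.getD j 0)

-- the effect of the back-popping loop on the live part of the deque
def popLive (xs : List Int) (v : Int) (l : List Nat) : List Nat :=
  if h : l ≠ [] ∧ v ≤ xs.getD (l.getLastD 0) 0 then popLive xs v l.dropLast else l
termination_by l.length
decreasing_by
  have h1 := List.length_pos_of_ne_nil h.1
  have h2 : l.dropLast.length = l.length - 1 := List.length_dropLast
  omega

theorem drop_dropLast_comm (l : List Nat) (n : Nat) :
    l.dropLast.drop n = (l.drop n).dropLast := by
  rw [List.dropLast_eq_take, List.dropLast_eq_take, List.drop_take, List.length_drop]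
  congr 1
  omega

theorem advanceHead_spec (dq : List Nat) (bound : Int) (head : Nat) (hh : head ≤ dq.length) :
    head ≤ advanceHead dq bound head ∧ advanceHead dq bound head ≤ dq.length ∧
    dq.drop (advanceHead dq bound head) =
      (dq.drop head).dropWhile (fun d : Nat => decide ((d : Int) < bound)) := by
  fun_induction advanceHead dq bound head with
  | case1 head h ih =>
    obtain ⟨ih1, ih2, ih3⟩ := ih (by omega)
    refine ⟨by omega, ih2, ?_⟩
    have hg : dq.getD head 0 = dq[head] := by
      rw [List.getD_eq_getElem?_getD, List.getElem?_eq_getElem h.1]; rfl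
    have h2' := h.2
    rw [hg] at h2'
    rw [ih3, List.drop_eq_getElem_cons h.1, List.dropWhile_cons, if_pos (by simpa using h2')]
  | case2 head h =>
    refine ⟨le_refl _, hh, ?_⟩
    rcases Nat.lt_or_ge head dq.length with hlt | hge
    · have hg : dq.getD head 0 = dq[head] := by
        rw [List.getD_eq_getElem?_getD, List.getElem?_eq_getElem hlt]; rfl
      have hne : ¬ ((dq.getD head 0 : Nat) : Int) < bound := fun hc => h ⟨hlt, hc⟩
      rw [hg] at hne
      rw [List.drop_eq_getElem_cons hlt, List.dropWhile_cons, if_neg (by simpa using hne)]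
    · have hnil : dq.drop head = [] := by rw [List.drop_eq_nil_iff]; omega
      rw [hnil]; rfl

theorem getLastD_drop (dq : List Nat) (head : Nat) (h : head < dq.length) :
    (dq.drop head).getLastD 0 = dq.getD (dq.length - 1) 0 := by
  rw [List.getLastD_eq_getLast?, List.getLast?_drop, if_neg (by omega),
      List.getLast?_eq_getElem?, List.getD_eq_getElem?_getD]

theorem popBack_eq (xs : List Int) (v : Int) (head : Nat) (dq : List Nat)
    (hh : head ≤ dq.length) :
    popBack xs v head dq = dq.take head ++ popLive xs v (dq.drop head) := by
  fun_induction popBack xs v head dq with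
  | case1 dq h ih =>
    have hlen : dq.dropLast.length = dq.length - 1 := List.length_dropLast
    have hne : dq.drop head ≠ [] := by
      intro hc; rw [List.drop_eq_nil_iff] at hc; omega
    have hlast : (dq.drop head).getLastD 0 = dq.getD (dq.length - 1) 0 :=
      getLastD_drop dq head h.1
    have hpop : popLive xs v (dq.drop head) = popLive xs v ((dq.drop head).dropLast) := by
      conv_lhs => rw [popLive]
      rw [dif_pos ⟨hne, by rw [hlast]; exact h.2⟩]
    have ht : dq.dropLast.take head = dq.take head := by
      rw [List.dropLast_eq_take, List.take_take]
      congr 1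
      omega
    rw [ih (by omega), ht, drop_dropLast_comm, ← hpop]
  | case2 dq h =>
    have hstop : popLive xs v (dq.drop head) = dq.drop head := by
      rw [popLive, dif_neg]
      intro hc
      have hlt : head < dq.length := by
        rcases Nat.lt_or_ge head dq.length with h1 | h1
        · exact h1
        · exact absurd (by rw [List.drop_eq_nil_iff]; omega) hc.1
      exact h ⟨hlt, by rw [← getLastD_drop dq head hlt]; exact hc.2⟩
    rw [hstop, List.take_append_drop]

theorem popLive_sublist (xs : List Int) (v : Int) (l : List Nat) :
    (popLive xs v l).Sublist l := by
  fun_induction popLive xs v l with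
  | case1 l h ih => exact ih.trans (List.dropLast_sublist l)
  | case2 l h => exact List.Sublist.refl l

theorem popLive_popped (xs : List Int) (v : Int) (l : List Nat) :
    ∀ d ∈ l, d ∉ popLive xs v l → v ≤ xs.getD d 0 := by
  fun_induction popLive xs v l with
  | case1 l h ih =>
    intro d hd hnd
    have hne := h.1
    have hv2 := h.2
    by_cases hdl : d ∈ l.dropLast
    · exact ih d hdl hnd
    · have h5 : l.getLast? = some (l.getLast hne) := List.getLast?_eq_some_getLast hne
      have hgl : l.getLastD 0 = l.getLast hne := by
        rw [List.getLastD_eq_getLast?, h5]; rfl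
      have hdlast : d = l.getLast hne := by
        have hsplit := List.dropLast_append_getLast hne
        conv at hd => rw [← hsplit]
        rcases List.mem_append.mp hd with h1 | h1
        · exact absurd h1 hdl
        · simpa using h1
      rw [hdlast, ← hgl]
      exact hv2
  | case2 l h =>
    intro d hd hnd
    exact absurd hd hnd

theorem popLive_last (xs : List Int) (v : Int) (l : List Nat) :
    popLive xs v l = [] ∨ xs.getD ((popLive xs v l).getLastD 0) 0 < v := by
  fun_induction popLive xs v l with
  | case1 l h ih => exact ih
  | case2 l h =>
    by_cases hl : l = []
    · exact Or.inl hl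
    · right
      by_contra hc
      exact h ⟨hl, by omega⟩

theorem le_getLastD_of_pairwise (xs : List Int) :
    ∀ (l : List Nat), l.Pairwise (dRel xs) → l ≠ [] →
      ∀ d ∈ l, xs.getD d 0 ≤ xs.getD (l.getLastD 0) 0 := by
  intro l
  induction l with
  | nil => intro _ hne; exact absurd rfl hne
  | cons a t ih =>
    intro hp _ d hd
    rcases List.mem_cons.mp hd with h1 | h1
    · subst h1
      cases t with
      | nil => simp
      | cons b t' =>
        have hne' : b :: t' ≠ [] := List.cons_ne_nil b t'
        have hgl : (b :: t').getLastD 0 = (b :: t').getLast hne' := by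
          rw [List.getLastD_eq_getLast?, List.getLast?_eq_some_getLast hne']; rfl
        have hmem : (b :: t').getLast hne' ∈ b :: t' := List.getLast_mem hne'
        have := (List.pairwise_cons.mp hp).1 _ hmem
        have hstep : (d :: b :: t').getLastD 0 = (b :: t').getLastD 0 := by
          rw [List.getLastD_eq_getLast?, List.getLastD_eq_getLast?, List.getLast?_cons_cons]
        rw [hstep, hgl]
        exact le_of_lt this.2
    · cases t with
      | nil => simp at h1
      | cons b t' =>
        have hstep : (a :: b :: t').getLastD 0 = (b :: t').getLastD 0 := by
          rw [List.getLastD_eq_getLast?, List.getLastD_eq_getLast?, List.getLast?_cons_cons]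
        rw [hstep]
        exact ih (List.pairwise_cons.mp hp).2 (List.cons_ne_nil b t') d h1

theorem head_min_of_pairwise (xs : List Int) (a : Nat) (t : List Nat)
    (hp : (a :: t).Pairwise (dRel xs)) :
    ∀ d ∈ a :: t, xs.getD a 0 ≤ xs.getD d 0 := by
  intro d hd
  rcases List.mem_cons.mp hd with h1 | h1
  · rw [h1]
  · exact le_of_lt ((List.pairwise_cons.mp hp).1 d h1).2

theorem dropWhile_cons_pred_false {p : Nat → Bool} :
    ∀ {l : List Nat} {a : Nat} {t : List Nat}, l.dropWhile p = a :: t → p a = false := by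
  intro l
  induction l with
  | nil => intro a t h; simp at h
  | cons x xs ih =>
    intro a t h
    rw [List.dropWhile_cons] at h
    split at h
    · exact ih h
    · have : x = a := by injection h
      subst this
      simpa using ‹¬ p x = true›

theorem foldl_winStep_le (xs : List Int) (i : Nat) :
    ∀ (l : List Nat) (m c : Int), m ≤ c → (∀ j ∈ l, xs.getD i 0 - xs.getD j 0 ≤ c) →
      l.foldl (winStep xs i) m ≤ c := by
  intro l
  induction l with
  | nil => intro m c hm _; exact hm
  | cons a t ih =>
    intro m c hm hl
    exact ih _ _ (max_le hm (hl a (by simp))) (fun j hj => hl j (by simp [hj]))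

theorem foldl_winStep_eq_max (xs : List Int) (i : Nat) (l : List Nat) (m : Int) (d0 : Nat)
    (hd0 : d0 ∈ l) (hmin : ∀ j ∈ l, xs.getD d0 0 ≤ xs.getD j 0) :
    l.foldl (winStep xs i) m = max m (xs.getD i 0 - xs.getD d0 0) := by
  have hge := PySem.List.le_foldl_max_int l (fun j => xs.getD i 0 - xs.getD j 0) m
  apply le_antisymm
  · apply foldl_winStep_le xs i l m _ (le_max_left _ _)
    intro j hj
    have := hmin j hj
    have h2 : xs.getD i 0 - xs.getD j 0 ≤ xs.getD i 0 - xs.getD d0 0 := by omega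
    exact h2.trans (le_max_right _ _)
  · exact max_le hge.1 (hge.2 d0 hd0)

-- ---------- the one-step lemma, stated on explicit components of altStep ----------
theorem step_core (xs : List Int) (K : Int) (hK : 0 < K) (i : Nat) (best : Int)
    (dq : List Nat) (head : Nat) (v : Int) (head' : Nat)
    (hv : v = xs.getD i 0) (hh' : head' = advanceHead dq ((i : Int) - K) head)
    (hh : head ≤ dq.length) (hinv : DqInv xs K i (dq.drop head)) :
    head' ≤ (popBack xs v head' dq ++ [i]).length ∧
    DqInv xs K (i + 1) ((popBack xs v head' dq ++ [i]).drop head') ∧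
    (if head' < dq.length then
       (if xs.getD i 0 - xs.getD (dq.getD head' 0) 0 > best
        then xs.getD i 0 - xs.getD (dq.getD head' 0) 0 else best)
     else best) = (win K i).foldl (winStep xs i) best := by
  subst hv
  obtain ⟨hb, hp, hcov⟩ := hinv
  obtain ⟨h1, h2, h3⟩ := advanceHead_spec dq ((i : Int) - K) head hh
  rw [← hh'] at h1 h2 h3
  have hsub1 : (dq.drop head').Sublist (dq.drop head) := by
    rw [h3]; exact List.dropWhile_sublist _
  have hb1 : ∀ d ∈ dq.drop head', d < i := fun d hd => hb d (hsub1.mem hd)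
  have hp1 : (dq.drop head').Pairwise (dRel xs) := hp.sublist hsub1
  have hcov1 : ∀ j : Nat, (i : Int) - K ≤ (j : Int) → j < i →
      ∃ d ∈ dq.drop head', j ≤ d ∧ xs.getD d 0 ≤ xs.getD j 0 := by
    intro j hj1 hj2
    obtain ⟨d, hd, hjd, hdv⟩ := hcov j hj1 hj2
    refine ⟨d, ?_, hjd, hdv⟩
    rw [h3]
    have hdsplit : d ∈ (dq.drop head).takeWhile (fun d : Nat => decide ((d : Int) < (i : Int) - K)) ++
        (dq.drop head).dropWhile (fun d : Nat => decide ((d : Int) < (i : Int) - K)) := by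
      rw [List.takeWhile_append_dropWhile]; exact hd
    rcases List.mem_append.mp hdsplit with h | h
    · exfalso
      have := List.mem_takeWhile_imp h
      simp only [decide_eq_true_eq] at this
      omega
    · exact h
  have hpb : popBack xs (xs.getD i 0) head' dq = dq.take head' ++ popLive xs (xs.getD i 0) (dq.drop head') :=
    popBack_eq xs (xs.getD i 0) head' dq h2
  have hlentake : (dq.take head').length = head' := by
    rw [List.length_take]; omega
  have hlen : head' ≤ (popBack xs (xs.getD i 0) head' dq ++ [i]).length := by
    rw [hpb]; simp; omega
  have hdrop : (popBack xs (xs.getD i 0) head' dq ++ [i]).drop head' =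
      popLive xs (xs.getD i 0) (dq.drop head') ++ [i] := by
    rw [hpb, List.append_assoc, List.drop_append_of_le_length (by omega),
        List.drop_eq_nil_iff.mpr (by omega)]
    simp
  refine ⟨hlen, ?_, ?_⟩
  · -- the invariant at i+1
    rw [hdrop]
    have hsub2 : (popLive xs (xs.getD i 0) (dq.drop head')).Sublist (dq.drop head') :=
      popLive_sublist xs (xs.getD i 0) (dq.drop head')
    refine ⟨?_, ?_, ?_⟩
    · intro d hd
      rcases List.mem_append.mp hd with h | h
      · exact Nat.lt_succ_of_lt (hb1 d (hsub2.mem h))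
      · simp at h; omega
    · rw [List.pairwise_append]
      refine ⟨hp1.sublist hsub2, List.pairwise_singleton _ _, ?_⟩
      intro a ha b hbmem
      simp only [List.mem_singleton] at hbmem
      rw [hbmem]
      have hai : a < i := hb1 a (hsub2.mem ha)
      refine ⟨hai, ?_⟩
      rcases popLive_last xs (xs.getD i 0) (dq.drop head') with hnil | hlast
      · rw [hnil] at ha; simp at ha
      · have hne2 : popLive xs (xs.getD i 0) (dq.drop head') ≠ [] := by
          intro hc; rw [hc] at ha; simp at ha
        have := le_getLastD_of_pairwise xs _ (hp1.sublist hsub2) hne2 a ha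
        omega
    · intro j hj1 hj2
      by_cases hji : j = i
      · exact ⟨i, by simp, by omega, by rw [hji]⟩
      · have hjlt : j < i := by omega
        obtain ⟨d, hd, hjd, hdv⟩ := hcov1 j (by push_cast at hj1 ⊢; omega) hjlt
        by_cases hdp : d ∈ popLive xs (xs.getD i 0) (dq.drop head')
        · exact ⟨d, List.mem_append.mpr (Or.inl hdp), hjd, hdv⟩
        · refine ⟨i, by simp, by omega, ?_⟩
          have := popLive_popped xs (xs.getD i 0) (dq.drop head') d hd hdp
          omega
  · -- the best-value formula
    rcases hl1 : dq.drop head' with _ | ⟨d0, rest⟩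
    · -- the live deque is empty: only possible when the window itself is empty (i = 0)
      have hge : dq.length ≤ head' := List.drop_eq_nil_iff.mp hl1
      rw [if_neg (by omega)]
      have hi0 : i = 0 := by
        by_contra hi
        obtain ⟨d, hd, -, -⟩ := hcov1 (i - 1) (by omega) (by omega)
        rw [hl1] at hd
        simp at hd
      have hw : win K i = [] := by
        unfold win loN
        have h0 : i - ((i : Int) - K).toNat = 0 := by omega
        rw [h0]
        rfl
      rw [hw]
      rfl
    · have hlt : head' < dq.length := by
        by_contra hc
        rw [List.drop_eq_nil_iff.mpr (by omega)] at hl1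
        exact List.cons_ne_nil d0 rest hl1.symm
      rw [if_pos hlt]
      have hd0get : dq.getD head' 0 = d0 := by
        rw [List.getD_eq_getElem?_getD, ← List.head?_drop, hl1]; rfl
      rw [hd0get, ite_gt_max]
      have he : (dq.drop head).dropWhile (fun d : Nat => decide ((d : Int) < (i : Int) - K)) = d0 :: rest := by
        rw [← h3]; exact hl1
      have hd0big : (i : Int) - K ≤ (d0 : Int) := by
        have := dropWhile_cons_pred_false he
        simpa using this
      have hd0mem : d0 ∈ dq.drop head' := by rw [hl1]; simp
      have hd0lt : d0 < i := hb1 d0 hd0mem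
      have hd0win : d0 ∈ win K i := by
        unfold win
        rw [List.mem_range'_1]
        unfold loN
        omega
      symm
      apply foldl_winStep_eq_max xs i (win K i) best d0 hd0win
      intro j hj
      rw [win, List.mem_range'_1] at hj
      have hjK : (i : Int) - K ≤ (j : Int) := by
        have hlo : loN K i ≤ j := hj.1
        unfold loN at hlo
        omega
      have hji : j < i := by
        have h6 := hj.2
        unfold loN at h6
        omega
      obtain ⟨d, hd, hjd, hdv⟩ := hcov1 j hjK hji
      rw [hl1] at hd
      have hmin : xs.getD d0 0 ≤ xs.getD d 0 := by
        rw [hl1] at hp1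
        exact head_min_of_pairwise xs d0 rest hp1 d hd
      omega

-- ---------- the main fold ----------
theorem fold_inv (xs : List Int) (K : Int) (hK : 0 < K) (n : Nat) :
    ((List.range n).foldl (altStep xs K) (0, ([], 0))).2.2 ≤
      ((List.range n).foldl (altStep xs K) (0, ([], 0))).2.1.length ∧
    DqInv xs K n (((List.range n).foldl (altStep xs K) (0, ([], 0))).2.1.drop
      ((List.range n).foldl (altStep xs K) (0, ([], 0))).2.2) ∧
    ((List.range n).foldl (altStep xs K) (0, ([], 0))).1 =
      (List.range n).foldl (fun m i => (win K i).foldl (winStep xs i) m) 0 := by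
  induction n with
  | zero =>
    refine ⟨Nat.le_refl 0, ⟨?_, List.Pairwise.nil, ?_⟩, rfl⟩
    · intro d hd
      simp at hd
    · intro j hj1 hj2
      exact absurd hj2 (Nat.not_lt_zero j)
  | succ n ih =>
    obtain ⟨ih1, ih2, ih3⟩ := ih
    rw [List.range_succ, List.foldl_append, List.foldl_append]
    simp only [List.foldl_cons, List.foldl_nil]
    have hs := step_core xs K hK n
        ((List.range n).foldl (altStep xs K) (0, ([], 0))).1
        ((List.range n).foldl (altStep xs K) (0, ([], 0))).2.1
        ((List.range n).foldl (altStep xs K) (0, ([], 0))).2.2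
        (xs.getD n 0)
        (advanceHead ((List.range n).foldl (altStep xs K) (0, ([], 0))).2.1 ((n : Int) - K)
          ((List.range n).foldl (altStep xs K) (0, ([], 0))).2.2)
        rfl rfl ih1 ih2
    refine ⟨hs.1, hs.2.1, ?_⟩
    have h3' : (altStep xs K ((List.range n).foldl (altStep xs K) (0, ([], 0))) n).1
        = (win K n).foldl (winStep xs n) ((List.range n).foldl (altStep xs K) (0, ([], 0))).1 :=
      hs.2.2
    rw [h3', ih3]

theorem B_eq_spec (xs : List Int) (K : Int) : search12_alt xs K = spec xs K := by
  unfold search12_alt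
  by_cases hK : K ≤ 0
  · rw [if_pos hK, spec_of_nonpos xs K hK]
  · rw [if_neg hK]
    unfold spec
    exact (fold_inv xs K (by omega) xs.length).2.2

-- ===== VERDICT (by name: the statement is the Claim_ definition above) =====
theorem search12_spec : Claim_equal_search12 := by
  intro xs K _
  unfold Spec_search12
  rw [A_eq_spec, B_eq_spec]
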